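-- pv_equiv track=rewrite | github.com/chilcano/how-tos | src/python_challenges/02_secure_fragment_allocation1.py | distribute_fragments
-- ===== SOURCE A (Python) =====
-- def distribute_fragments(datacenter_risks, total_fragments):
--     # Sort the datacenter risks in ascending order
--     datacenter_risks_asc_sorted = sorted(datacenter_risks)
--
--     # Initialize the count of fragments in each datacenter
--     fragments_distribution = [0] * len(datacenter_risks)
--
--     # Distribute the fragment
--     for _ in range(total_fragments):
--         min_risk_index = 0
--         # Find the datacenter with the minimum risk after allocating a fragment
--         min_total_risk = (datacenter_risks_asc_sorted[0] ** (fragments_distribution[0] + 1))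
--         for i in range(1, len(datacenter_risks_asc_sorted)):
--             potential_risk = (datacenter_risks_asc_sorted[i] ** (fragments_distribution[i] + 1))
--             if potential_risk < min_total_risk:
--                 min_total_risk = potential_risk
--                 min_risk_index = i
--
--         # Allocate a fragment to the datacenter with the minimum increased risk
--         fragments_distribution[min_risk_index] += 1
--
--     # Calculate the total risk
--     total_risk = sum(datacenter_risks_asc_sorted[i] ** fragments_distribution[i] for i in range(len(fragments_distribution)))
--
--     return total_risk, fragments_distribution
-- ===== SOURCE B (Python) =====
-- def distribute_fragments(datacenter_risks, total_fragments):
--     # Alternative strategy: keep the candidate next-risks in an ascending ordered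
--     # list of (potential_risk, index) pairs; each fragment pops the least pair and
--     # re-inserts the center's next power at its ordered position, instead of
--     # rescanning all centers for every fragment.
--     risks = sorted(datacenter_risks)
--     n = len(risks)
--     counts = [0] * n
--     # (risks[i] ** 1, i) is already ascending because risks is sorted
--     ordered = [(risks[i], i) for i in range(n)]
--     for _ in range(total_fragments):
--         _, i = ordered.pop(0)
--         counts[i] += 1
--         newkey = (risks[i] ** (counts[i] + 1), i)
--         pos = 0
--         while pos < len(ordered) and ordered[pos] < newkey:
--             pos += 1
--         ordered.insert(pos, newkey)
--     total_risk = sum(risks[i] ** counts[i] for i in range(n))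
--     return total_risk, counts
-- ===== Notes on version B (the rewrite author's own statement) =====
-- stated objective: alternative
-- what changed: Replaces A's per-fragment full rescan of all centers by an ascending ordered list of (next potential risk, index) pairs that is popped at the head and re-inserted at the new key's ordered position each fragment.
import Mathlib
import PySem

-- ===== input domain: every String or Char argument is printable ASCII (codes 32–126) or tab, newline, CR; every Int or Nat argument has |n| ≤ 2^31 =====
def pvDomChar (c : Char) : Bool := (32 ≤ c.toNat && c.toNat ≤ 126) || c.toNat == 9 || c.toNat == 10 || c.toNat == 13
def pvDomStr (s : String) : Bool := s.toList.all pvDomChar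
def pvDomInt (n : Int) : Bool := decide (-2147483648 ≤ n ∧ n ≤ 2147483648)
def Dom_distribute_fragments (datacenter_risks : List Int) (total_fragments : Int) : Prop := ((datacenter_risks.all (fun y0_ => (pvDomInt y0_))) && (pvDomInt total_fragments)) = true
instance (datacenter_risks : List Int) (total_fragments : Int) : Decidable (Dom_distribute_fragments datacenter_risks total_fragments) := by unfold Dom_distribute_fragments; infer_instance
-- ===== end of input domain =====

-- B replaces A's per-fragment rescan of all centers by an ascending ordered list of
-- (next potential risk, index) pairs: pop the least pair, re-insert the center's next
-- power at its ordered position (alternative data structure, same exact results).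

-- `risks[i] ** (counts[i] + 1)` — the literal Python subexpression both versions use
def pvPot (srt counts : List Int) (i : Int) : Int :=
  (PySem.List.pyGetD srt i 0) ^ ((PySem.List.pyGetD counts i 0) + 1).toNat

-- ===== PORT A =====
-- inner scan: for i in range(1, n): if potential_risk < min_total_risk: update
def pvScanA (srt counts : List Int) : Int × Int :=
  (PySem.List.pyRange 1 (srt.length : Int) 1).foldl
    (fun s i => let p := pvPot srt counts i; if p < s.1 then (p, i) else s)
    (pvPot srt counts 0, 0)

-- for _ in range(total_fragments): find argmin, increment it
def pvLoopA (srt : List Int) : Nat → List Int → List Int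
  | 0, counts => counts
  | fuel + 1, counts =>
    let mi := (pvScanA srt counts).2
    pvLoopA srt fuel (counts.set mi.toNat ((PySem.List.pyGetD counts mi 0) + 1))

def distribute_fragments (datacenter_risks : List Int) (total_fragments : Int) : Int × List Int :=
  let srt := PySem.List.sorted datacenter_risks (fun x => x) false
  let dist := pvLoopA srt total_fragments.toNat (List.replicate datacenter_risks.length (0 : Int))
  let total := ((PySem.List.pyRange 0 (dist.length : Int) 1).map
      (fun i => (PySem.List.pyGetD srt i 0) ^ (PySem.List.pyGetD dist i 0).toNat)).sum
  (total, dist)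

-- ===== PORT B =====
-- Python tuple comparison `<` on the (potential, index) pairs
def pvPairLt (a b : Int × Int) : Bool := a.1 < b.1 || (a.1 == b.1 && a.2 < b.2)

-- the hand-written position scan + insert of Source B
def pvInsert (k : Int × Int) : List (Int × Int) → List (Int × Int)
  | [] => [k]
  | x :: xs => if pvPairLt x k then x :: pvInsert k xs else k :: x :: xs

-- for _ in range(total_fragments): pop least pair, increment, re-insert next power
def pvLoopB (risks : List Int) : Nat → List Int → List (Int × Int) → List Int × List (Int × Int)
  | 0, counts, ordered => (counts, ordered)
  | fuel + 1, counts, ordered =>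
    match ordered with
    | [] => (counts, ordered)   -- unreachable inside Pre_ (Python raises IndexError here)
    | (_, i) :: rest =>
      let counts' := counts.set i.toNat ((PySem.List.pyGetD counts i 0) + 1)
      let newkey := (pvPot risks counts' i, i)
      pvLoopB risks fuel counts' (pvInsert newkey rest)

def distribute_fragments_alt (datacenter_risks : List Int) (total_fragments : Int) : Int × List Int :=
  let risks := PySem.List.sorted datacenter_risks (fun x => x) false
  let n := risks.length
  let ordered := (PySem.List.pyRange 0 (n : Int) 1).map (fun i => (PySem.List.pyGetD risks i 0, i))
  let counts := (pvLoopB risks total_fragments.toNat (List.replicate n (0 : Int)) ordered).1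
  let total := ((PySem.List.pyRange 0 (n : Int) 1).map
      (fun i => (PySem.List.pyGetD risks i 0) ^ (PySem.List.pyGetD counts i 0).toNat)).sum
  (total, counts)

-- ===== PRECONDITION & SPEC =====
-- Pre_ excludes only the inputs where the Python A raises IndexError: an empty risk
-- list together with a positive fragment count (B raises IndexError there as well).
def Pre_distribute_fragments (datacenter_risks : List Int) (total_fragments : Int) : Prop :=
  datacenter_risks ≠ [] ∨ total_fragments ≤ 0
instance (datacenter_risks : List Int) (total_fragments : Int) : Decidable (Pre_distribute_fragments datacenter_risks total_fragments) := by unfold Pre_distribute_fragments; infer_instance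

def pvWitness_distribute_fragments : List Int × Int := ([3, 2, 5], 4)

def Spec_distribute_fragments (datacenter_risks : List Int) (total_fragments : Int) (out : Int × List Int) : Prop := out = distribute_fragments_alt datacenter_risks total_fragments
instance (datacenter_risks : List Int) (total_fragments : Int) (out : Int × List Int) : Decidable (Spec_distribute_fragments datacenter_risks total_fragments out) := by unfold Spec_distribute_fragments; infer_instance

-- ===== CLAIM (what is proved, stated in full; the proofs are below) =====
def Claim_equal_distribute_fragments : Prop := ∀ (datacenter_risks : List Int) (total_fragments : Int), Dom_distribute_fragments datacenter_risks total_fragments → Pre_distribute_fragments datacenter_risks total_fragments → Spec_distribute_fragments datacenter_risks total_fragments (distribute_fragments datacenter_risks total_fragments)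

-- ===== LEMMAS AND PROOFS =====

-- the multiset of candidate pairs (potential, index) for the current counts
def pvTarget (srt counts : List Int) : List (Int × Int) :=
  (PySem.List.pyRange 0 (srt.length : Int) 1).map (fun i => (pvPot srt counts i, i))

def pvLexLe (a b : Int × Int) : Prop := a.1 < b.1 ∨ (a.1 = b.1 ∧ a.2 ≤ b.2)

theorem pvPairLt_iff (a b : Int × Int) : pvPairLt a b = true ↔ (a.1 < b.1 ∨ (a.1 = b.1 ∧ a.2 < b.2)) := by
  simp [pvPairLt]

theorem pvLexLe_trans {a b c : Int × Int} (h1 : pvLexLe a b) (h2 : pvLexLe b c) : pvLexLe a c := by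
  unfold pvLexLe at *; omega

theorem pvLexLe_antisymm {a b : Int × Int} (h1 : pvLexLe a b) (h2 : pvLexLe b a) : a = b := by
  unfold pvLexLe at *
  have : a.1 = b.1 ∧ a.2 = b.2 := by omega
  exact Prod.ext this.1 this.2

theorem pvLexLe_of_lt {a b : Int × Int} (h : pvPairLt a b = true) : pvLexLe a b := by
  rw [pvPairLt_iff] at h; unfold pvLexLe; omega

-- A's scan computes a lexicographic minimum of init :: mapped indices
theorem pvScan_min (srt counts : List Int) (L : List Int) (s : Int × Int)
    (hs : ∀ i ∈ L, s.2 < i) (hL : L.Pairwise (· < ·)) :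
    (L.foldl (fun s i => let p := pvPot srt counts i; if p < s.1 then (p, i) else s) s)
      ∈ s :: L.map (fun i => (pvPot srt counts i, i)) ∧
    ∀ x ∈ s :: L.map (fun i => (pvPot srt counts i, i)),
      pvLexLe (L.foldl (fun s i => let p := pvPot srt counts i; if p < s.1 then (p, i) else s) s) x := by
  induction L generalizing s with
  | nil => simp [pvLexLe]
  | cons i L ih =>
    have hpw := (List.pairwise_cons.mp hL).1
    have hL' := (List.pairwise_cons.mp hL).2
    by_cases hlt : pvPot srt counts i < s.1
    · have hs' : ∀ j ∈ L, ((pvPot srt counts i, i) : Int × Int).2 < j := fun j hj => hpw j hj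
      have H := ih (pvPot srt counts i, i) hs' hL'
      simp only [List.foldl_cons, if_pos hlt]
      refine ⟨?_, ?_⟩
      · rcases List.mem_cons.mp H.1 with h | h
        · simp [h]
        · simp [h]
      · intro x hx
        rcases List.mem_cons.mp hx with rfl | hx'
        · refine pvLexLe_trans (H.2 _ List.mem_cons_self) ?_
          exact Or.inl hlt
        · exact H.2 x hx'
    · have hs' : ∀ j ∈ L, s.2 < j := fun j hj => hs j (List.mem_cons_of_mem _ hj)
      have H := ih s hs' hL'
      simp only [List.foldl_cons, if_neg hlt]
      refine ⟨?_, ?_⟩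
      · rcases List.mem_cons.mp H.1 with h | h
        · simp [h]
        · simp [h]
      · intro x hx
        rcases List.mem_cons.mp hx with rfl | hx'
        · exact H.2 _ List.mem_cons_self
        · rcases List.mem_cons.mp hx' with rfl | hx''
          · refine pvLexLe_trans (H.2 _ List.mem_cons_self) ?_
            have hi : s.2 < i := hs i List.mem_cons_self
            unfold pvLexLe
            simp only []
            omega
          · exact H.2 x (List.mem_cons_of_mem _ hx'')

theorem pvInsert_perm (k : Int × Int) (xs : List (Int × Int)) : (pvInsert k xs).Perm (k :: xs) := by
  induction xs with
  | nil => simp [pvInsert]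
  | cons x xs ih =>
    unfold pvInsert
    split
    · exact (ih.cons x).trans (List.Perm.swap k x xs)
    · exact List.Perm.refl _

theorem pvPairLt_of_not {x k : Int × Int} (h : ¬ pvPairLt x k = true) (hne : x.2 ≠ k.2) :
    pvPairLt k x = true := by
  rw [pvPairLt_iff]
  rw [pvPairLt_iff] at h
  omega

theorem pvPairLt_trans {a b c : Int × Int} (h1 : pvPairLt a b = true) (h2 : pvPairLt b c = true) :
    pvPairLt a c = true := by
  rw [pvPairLt_iff] at *; omega

theorem pvInsert_pairwise (k : Int × Int) (xs : List (Int × Int))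
    (hx : xs.Pairwise (fun a b => pvPairLt a b = true))
    (hne : ∀ x ∈ xs, x.2 ≠ k.2) :
    (pvInsert k xs).Pairwise (fun a b => pvPairLt a b = true) := by
  induction xs with
  | nil => simp [pvInsert]
  | cons x xs ih =>
    unfold pvInsert
    split
    · rename_i hlt
      refine List.pairwise_cons.mpr ⟨?_, ih (List.pairwise_cons.mp hx).2 (fun y hy => hne y (List.mem_cons_of_mem _ hy))⟩
      intro y hy
      rcases List.mem_cons.mp ((pvInsert_perm k xs).mem_iff.mp hy) with rfl | hy'
      · exact hlt
      · exact (List.pairwise_cons.mp hx).1 y hy'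
    · rename_i hnlt
      refine List.pairwise_cons.mpr ⟨?_, hx⟩
      intro y hy
      rcases List.mem_cons.mp hy with rfl | hy'
      · exact pvPairLt_of_not hnlt (hne _ List.mem_cons_self)
      · exact pvPairLt_trans (pvPairLt_of_not hnlt (hne _ List.mem_cons_self))
          ((List.pairwise_cons.mp hx).1 y hy')

theorem pvGetD_replicate_zero (n : Nat) (i : Int) :
    PySem.List.pyGetD (List.replicate n (0 : Int)) i 0 = 0 := by
  rcases h : PySem.List.pyGet? (List.replicate n (0 : Int)) i with _ | x
  · simp [PySem.List.pyGetD, h]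
  · have hx := List.eq_of_mem_replicate (PySem.List.mem_of_pyGet?_eq_some _ h)
    simp [PySem.List.pyGetD, h, hx]

-- potentials only change at the updated index
theorem pvPot_set_ne (srt counts : List Int) (j : Nat) (v : Int) (i : Int)
    (hij : i ≠ (j : Int)) (hi : 0 ≤ i) :
    pvPot srt (counts.set j v) i = pvPot srt counts i := by
  unfold pvPot
  have h2 : PySem.List.pyGetD (counts.set j v) i 0 = PySem.List.pyGetD counts i 0 := by
    rw [PySem.List.pyGetD_of_nonneg _ _ hi, PySem.List.pyGetD_of_nonneg _ _ hi]
    have hne : j ≠ i.toNat := by omega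
    simp [List.getD_eq_getElem?_getD, List.getElem?_set_ne hne]
  rw [h2]

-- replacing counts at j rearranges the target into newkey :: target.erase oldkey
theorem pvTarget_update (srt counts : List Int) (j : Nat) (v : Int)
    (hj : ((j : Int)) < (srt.length : Int)) :
    (pvTarget srt (counts.set j v)).Perm
      ((pvPot srt (counts.set j v) (j : Int), (j : Int)) ::
        (pvTarget srt counts).erase (pvPot srt counts (j : Int), (j : Int))) := by
  have hj0 : (0 : Int) ≤ (j : Int) := Int.natCast_nonneg j
  have hsplit : PySem.List.pyRange 0 (srt.length : Int) =
      PySem.List.pyRange 0 (j : Int) ++ ((j : Int) :: PySem.List.pyRange ((j : Int) + 1) (srt.length : Int)) := by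
    rw [PySem.List.pyRange_one_append 0 (j : Int) (srt.length : Int) hj0 (le_of_lt hj),
      PySem.List.pyRange_one_cons hj]
  have hpre : ∀ g : Int → Int × Int,
      ((PySem.List.pyRange 0 (j : Int)).map fun i => (pvPot srt (counts.set j v) i, i)) =
      ((PySem.List.pyRange 0 (j : Int)).map fun i => (pvPot srt counts i, i)) := by
    intro _
    refine List.map_congr_left (fun i hi => ?_)
    have := PySem.List.mem_pyRange_one.mp hi
    rw [pvPot_set_ne srt counts j v i (by omega) this.1]
  have hpost :
      ((PySem.List.pyRange ((j : Int) + 1) (srt.length : Int)).map fun i => (pvPot srt (counts.set j v) i, i)) =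
      ((PySem.List.pyRange ((j : Int) + 1) (srt.length : Int)).map fun i => (pvPot srt counts i, i)) := by
    refine List.map_congr_left (fun i hi => ?_)
    have := PySem.List.mem_pyRange_one.mp hi
    rw [pvPot_set_ne srt counts j v i (by omega) (by omega)]
  have hnotmem : (pvPot srt counts (j : Int), (j : Int)) ∉
      ((PySem.List.pyRange 0 (j : Int)).map fun i => (pvPot srt counts i, i)) := by
    intro hmem
    rcases List.mem_map.mp hmem with ⟨i, hi, heq⟩
    have hbd := PySem.List.mem_pyRange_one.mp hi
    have : i = (j : Int) := congrArg Prod.snd heq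
    omega
  unfold pvTarget
  rw [hsplit]
  simp only [List.map_append, List.map_cons]
  rw [hpre (fun i => (pvPot srt counts i, i)), hpost]
  rw [List.erase_append_right _ hnotmem, List.erase_cons_head]
  exact List.perm_middle

theorem pvLoopA_length (srt : List Int) (fuel : Nat) (counts : List Int) :
    (pvLoopA srt fuel counts).length = counts.length := by
  induction fuel generalizing counts with
  | zero => rfl
  | succ fuel ih => simp [pvLoopA, ih]

theorem pvTarget_snd (srt counts : List Int) :
    (pvTarget srt counts).map Prod.snd = PySem.List.pyRange 0 (srt.length : Int) := by
  unfold pvTarget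
  rw [List.map_map, show (Prod.snd ∘ fun i => (pvPot srt counts i, i)) = id from rfl, List.map_id]

-- main loop correspondence
theorem pvLoop_eq (srt : List Int) (hn : 0 < srt.length) (fuel : Nat) :
    ∀ (counts : List Int) (ordered : List (Int × Int)),
    counts.length = srt.length →
    ordered.Perm (pvTarget srt counts) →
    ordered.Pairwise (fun a b => pvPairLt a b = true) →
    pvLoopA srt fuel counts = (pvLoopB srt fuel counts ordered).1 := by
  induction fuel with
  | zero => intro counts ordered _ _ _; rfl
  | succ fuel ih =>
    intro counts ordered hlen hperm hpw
    have hnz : (0 : Int) < (srt.length : Int) := by exact_mod_cast hn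
    -- target = f 0 :: map f (pyRange 1 n)
    have htgt : pvTarget srt counts =
        (pvPot srt counts 0, (0 : Int)) ::
          (PySem.List.pyRange 1 (srt.length : Int)).map (fun i => (pvPot srt counts i, i)) := by
      unfold pvTarget
      rw [PySem.List.pyRange_one_cons hnz, List.map_cons]
      norm_num
    -- ordered is nonempty
    cases ordered with
    | nil =>
      exfalso
      have := hperm.length_eq
      rw [htgt] at this
      simp at this
    | cons o rest =>
      obtain ⟨p, i⟩ := o
      -- o is in the target and is its lex minimum
      have homem : ((p, i) : Int × Int) ∈ pvTarget srt counts :=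
        hperm.mem_iff.mp List.mem_cons_self
      have homin : ∀ x ∈ pvTarget srt counts, pvLexLe (p, i) x := by
        intro x hx
        rcases List.mem_cons.mp (hperm.mem_iff.mpr hx) with rfl | hx'
        · exact Or.inr ⟨rfl, le_refl _⟩
        · exact pvLexLe_of_lt ((List.pairwise_cons.mp hpw).1 x hx')
      -- A's scan result equals (p, i)
      have hscan := pvScan_min srt counts (PySem.List.pyRange 1 (srt.length : Int))
        (pvPot srt counts 0, 0)
        (fun j hj => by
          have h := PySem.List.mem_pyRange_one.mp hj
          show (0 : Int) < j
          omega)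
        (PySem.List.pairwise_lt_pyRange_one 1 (srt.length : Int))
      have hA1 : pvScanA srt counts ∈ pvTarget srt counts := by
        unfold pvScanA; rw [htgt]; exact hscan.1
      have hA2 : ∀ x ∈ pvTarget srt counts, pvLexLe (pvScanA srt counts) x := by
        unfold pvScanA; rw [htgt]; exact hscan.2
      have hr : pvScanA srt counts = (p, i) :=
        pvLexLe_antisymm (hA2 _ homem) (homin _ hA1)
      -- i is a valid index
      rcases List.mem_map.mp homem with ⟨i0, hi0, heq⟩
      have hi2 : i0 = i := congrArg Prod.snd heq
      subst hi2
      have hibd := PySem.List.mem_pyRange_one.mp hi0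
      have hp : p = pvPot srt counts i0 := (congrArg Prod.fst heq).symm
      have hcast : ((i0.toNat : Int)) = i0 := Int.toNat_of_nonneg hibd.1
      -- the two updated count lists coincide
      set counts' := counts.set i0.toNat ((PySem.List.pyGetD counts i0 0) + 1) with hc'
      -- new invariant facts
      have hlen' : counts'.length = srt.length := by simp [hc', hlen]
      have hupd := pvTarget_update srt counts i0.toNat ((PySem.List.pyGetD counts i0 0) + 1)
        (by rw [hcast]; exact hibd.2)
      rw [hcast] at hupd
      have hrest : rest.Perm ((pvTarget srt counts).erase (p, i0)) := by
        have h1 : ((pvTarget srt counts).erase ((p, i0) : Int × Int)).Perm (((p, i0) :: rest).erase (p, i0)) :=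
          (hperm.symm).erase _
      

        rw [List.erase_cons_head] at h1
        exact h1.symm
      have hperm' : (pvInsert (pvPot srt counts' i0, i0) rest).Perm (pvTarget srt counts') := by
        refine (pvInsert_perm _ _).trans ?_
        refine List.Perm.trans ?_ hupd.symm
        exact (hrest.cons _).trans (by rw [hp])
      -- indices in rest differ from i0
      have hne : ∀ x ∈ rest, x.2 ≠ i0 := by
        have hnd : ((pvTarget srt counts).map Prod.snd).Nodup := by
          rw [pvTarget_snd]; exact PySem.List.nodup_pyRange_one 0 _
        have hnd2 : (((p, i0) :: rest).map Prod.snd).Nodup :=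
          (hperm.map Prod.snd).nodup_iff.mpr hnd
        simp only [List.map_cons, List.nodup_cons] at hnd2
        intro x hx hxe
        exact hnd2.1 (hxe ▸ List.mem_map_of_mem hx)
      have hpw' : (pvInsert (pvPot srt counts' i0, i0) rest).Pairwise (fun a b => pvPairLt a b = true) :=
        pvInsert_pairwise _ _ (List.pairwise_cons.mp hpw).2 hne
      -- step both loops
      show pvLoopA srt (fuel + 1) counts = (pvLoopB srt (fuel + 1) counts ((p, i0) :: rest)).1
      rw [pvLoopA, pvLoopB]
      simp only [hr]
      exact ih counts' (pvInsert (pvPot srt counts' i0, i0) rest) hlen' hperm' hpw'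

theorem pvInit_pairwise (srt : List Int) (hs : srt.Pairwise (· ≤ ·)) :
    ((PySem.List.pyRange 0 (srt.length : Int)).map
        (fun i => (PySem.List.pyGetD srt i 0, i))).Pairwise (fun a b => pvPairLt a b = true) := by
  rw [List.pairwise_iff_getElem]
  intro k k' hk hk' hkk'
  simp only [List.length_map, PySem.List.length_pyRange_one] at hk hk'
  have hkn : k < srt.length := by omega
  have hk'n : k' < srt.length := by omega
  have hget : ∀ (m : Nat) (hm : m < srt.length),
      ((PySem.List.pyRange 0 (srt.length : Int)).map (fun i => (PySem.List.pyGetD srt i 0, i)))[m]'(by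
        simp only [List.length_map, PySem.List.length_pyRange_one]; omega) =
      (srt[m], (m : Int)) := by
    intro m hm
    rw [List.getElem_map]
    rw [PySem.List.getElem_pyRange_one]
    simp only [zero_add]
    rw [PySem.List.pyGetD_natCast]
    rw [List.getD_eq_getElem?_getD, List.getElem?_eq_getElem hm]
    rfl
  rw [hget k hkn, hget k' hk'n]
  have hle : srt[k] ≤ srt[k'] := List.pairwise_iff_getElem.mp hs k k' hkn hk'n hkk'
  rw [pvPairLt_iff]
  simp only
  have : (k : Int) < (k' : Int) := by exact_mod_cast hkk'
  omega

theorem pvInit_target (srt : List Int) (n : Nat) :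
    ((PySem.List.pyRange 0 (srt.length : Int)).map (fun i => (PySem.List.pyGetD srt i 0, i))) =
      pvTarget srt (List.replicate n (0 : Int)) := by
  unfold pvTarget
  refine List.map_congr_left (fun i _ => ?_)
  unfold pvPot
  rw [pvGetD_replicate_zero]
  norm_num

-- ===== VERDICT (by name: the statement is the Claim_ definition above) =====
theorem distribute_fragments_spec : Claim_equal_distribute_fragments := by
  intro rs tf _ hpre
  unfold Spec_distribute_fragments
  by_cases hrs : rs = []
  · subst hrs
    have htf : tf ≤ 0 := by
      rcases hpre with h | h
      · exact absurd rfl h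
      · exact h
    have h0 : tf.toNat = 0 := Int.toNat_of_nonpos htf
    simp [distribute_fragments, distribute_fragments_alt, h0, pvLoopA, pvLoopB]
  · have hn : 0 < (PySem.List.sorted rs (fun x => x) false).length := by
      rw [PySem.List.length_sorted]
      exact List.length_pos_iff.mpr hrs
    simp only [distribute_fragments, distribute_fragments_alt]
    set srt := PySem.List.sorted rs (fun x => x) false with hsrt
    have hlenr : srt.length = rs.length := PySem.List.length_sorted rs _ _
    have hsp : srt.Pairwise (· ≤ ·) := PySem.List.sorted_pairwise rs (fun x => x)
    have hmain := pvLoop_eq srt hn tf.toNat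
      (List.replicate rs.length (0 : Int))
      ((PySem.List.pyRange 0 (srt.length : Int)).map (fun i => (PySem.List.pyGetD srt i 0, i)))
      (by rw [List.length_replicate, hlenr])
      (by rw [pvInit_target srt rs.length])
      (pvInit_pairwise srt hsp)
    rw [hlenr] at hmain
    rw [hlenr, pvLoopA_length, List.length_replicate, hmain]
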